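-- pv_equiv track=rewrite | github.com/Robert-Rutherford/learning-Python | practiceProblems/rearrangeTheNumber.py | rearranged_difference
-- ===== SOURCE A (Python) =====
-- def rearranged_difference(num):
--     listnum = list()
--     for x in str(num):
--         listnum.append(x)
--     listnum.sort()
--     joiner = ""
--     smallest = int(joiner.join(listnum))
--     listnum.reverse()
--     largest = int(joiner.join(listnum))
--     return largest - smallest
-- ===== SOURCE B (Python) =====
-- def rearranged_difference(num):
--     counts = {}
--     for ch in str(num):
--         counts[ch] = counts.get(ch, 0) + 1
--     smallest = ""
--     largest = ""
--     for d in "0123456789":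
--         smallest += d * counts.get(d, 0)
--     for d in "9876543210":
--         largest += d * counts.get(d, 0)
--     return int(largest) - int(smallest)
-- ===== Notes on version B (the rewrite author's own statement) =====
-- stated objective: alternative
-- what changed: Replaces the sort+reverse of the digit list by a counting-sort: a frequency table over the characters of str(num), from which the smallest and largest strings are emitted by scanning the digits in ascending and descending order.
import Mathlib
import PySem

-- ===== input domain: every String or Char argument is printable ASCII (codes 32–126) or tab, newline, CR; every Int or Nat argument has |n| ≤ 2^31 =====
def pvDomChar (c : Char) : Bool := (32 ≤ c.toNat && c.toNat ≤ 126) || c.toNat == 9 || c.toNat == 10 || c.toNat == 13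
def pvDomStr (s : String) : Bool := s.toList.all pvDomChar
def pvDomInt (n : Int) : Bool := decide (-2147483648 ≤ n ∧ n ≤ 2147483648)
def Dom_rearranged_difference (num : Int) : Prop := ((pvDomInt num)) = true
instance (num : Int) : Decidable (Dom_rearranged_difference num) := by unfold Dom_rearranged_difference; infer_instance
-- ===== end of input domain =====

-- B replaces A's sort+reverse of the digit list by a counting sort: a frequency table over
-- the characters of str(num), emitted in ascending / descending digit order (objective: alternative).

-- ===== PORT A =====
def rearranged_difference (num : Int) : Int :=
  -- listnum = []; for x in str(num): listnum.append(x)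
  let listnum := (PySem.Int.toChars num).foldl (fun acc x => acc ++ [x]) ([] : List Char)
  -- listnum.sort()
  let listnum := PySem.List.sorted listnum (fun x => x) false
  -- smallest = int("".join(listnum))  (int() may raise ValueError → Option)
  let smallest? := PySem.Int.ofChars? listnum
  -- listnum.reverse()
  let listnum := listnum.reverse
  -- largest = int("".join(listnum))
  let largest? := PySem.Int.ofChars? listnum
  match largest?, smallest? with
  | some largest, some smallest => largest - smallest
  | _, _ => 0   -- unreachable under Pre_ (Python raises ValueError here)

-- ===== PORT B =====
-- the characters of "0123456789" and "9876543210"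
def pvDigits : List Char := ['0','1','2','3','4','5','6','7','8','9']
def pvDigitsRev : List Char := ['9','8','7','6','5','4','3','2','1','0']

def rearranged_difference_alt (num : Int) : Int :=
  -- counts = {}; for ch in str(num): counts[ch] = counts.get(ch, 0) + 1
  let counts := (PySem.Int.toChars num).foldl
      (fun d ch => d.insert ch (d.getD ch 0 + 1)) (PySem.Dict.empty : PySem.Dict Char Int)
  -- smallest = ""; for d in "0123456789": smallest += d * counts.get(d, 0)
  let smallest := pvDigits.foldl
      (fun acc d => acc ++ List.replicate (counts.getD d 0).toNat d) ([] : List Char)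
  -- largest = ""; for d in "9876543210": largest += d * counts.get(d, 0)
  let largest := pvDigitsRev.foldl
      (fun acc d => acc ++ List.replicate (counts.getD d 0).toNat d) ([] : List Char)
  -- return int(largest) - int(smallest)
  match PySem.Int.ofChars? largest with
  | none => 0   -- unreachable under Pre_ (ValueError)
  | some l =>
    match PySem.Int.ofChars? smallest with
    | none => 0
    | some s => l - s

-- ===== PRECONDITION & SPEC =====
-- Pre_ excludes negative num, on which A raises ValueError: the reversed sorted digit
-- string ends in '-' and int() rejects it.
def Pre_rearranged_difference (num : Int) : Prop := 0 ≤ num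
instance (num : Int) : Decidable (Pre_rearranged_difference num) := by
  unfold Pre_rearranged_difference; infer_instance

def pvWitness_rearranged_difference : Int := 271

def Spec_rearranged_difference (num : Int) (out : Int) : Prop := out = rearranged_difference_alt num
instance (num : Int) (out : Int) : Decidable (Spec_rearranged_difference num out) := by
  unfold Spec_rearranged_difference; infer_instance

-- ===== CLAIM (what is proved, stated in full; the proofs are below) =====
def Claim_equal_rearranged_difference : Prop :=
  ∀ (num : Int), Dom_rearranged_difference num → Pre_rearranged_difference num →
    Spec_rearranged_difference num (rearranged_difference num)

-- ===== LEMMAS AND PROOFS =====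

-- every digit character produced by Nat.digitChar in base 10 is one of '0'..'9'
lemma digitChar_mem_pvDigits (m : Nat) (h : m < 10) : Nat.digitChar m ∈ pvDigits := by
  interval_cases m <;> decide

lemma mem_toDigitsCore (f : Nat) : ∀ (n : Nat) (ds : List Char) (c : Char),
    c ∈ Nat.toDigitsCore 10 f n ds → c ∈ pvDigits ∨ c ∈ ds := by
  induction f with
  | zero => intro n ds c hc; simp only [Nat.toDigitsCore] at hc; exact Or.inr hc
  | succ f ih =>
    intro n ds c hc
    simp only [Nat.toDigitsCore] at hc
    by_cases h : n / 10 = 0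
    · rw [if_pos h] at hc
      rcases List.mem_cons.mp hc with h1 | h2
      · exact Or.inl (h1 ▸ digitChar_mem_pvDigits _ (Nat.mod_lt _ (by norm_num)))
      · exact Or.inr h2
    · rw [if_neg h] at hc
      rcases ih _ _ _ hc with h1 | h2
      · exact Or.inl h1
      · rcases List.mem_cons.mp h2 with h3 | h4
        · exact Or.inl (h3 ▸ digitChar_mem_pvDigits _ (Nat.mod_lt _ (by norm_num)))
        · exact Or.inr h4

lemma toChars_mem_pvDigits (num : Int) (h : 0 ≤ num) :
    ∀ c ∈ PySem.Int.toChars num, c ∈ pvDigits := by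
  intro c hc
  unfold PySem.Int.toChars at hc
  rw [if_neg (by omega)] at hc
  rcases mem_toDigitsCore _ _ _ _ hc with h1 | h2
  · exact h1
  · simp at h2

-- counting-sort emission: count of any character in the emitted list
lemma count_emission (ds : List Char) (hnd : ds.Nodup) (f : Char → Nat) (a : Char) :
    (ds.flatMap (fun d => List.replicate (f d) d)).count a = if a ∈ ds then f a else 0 := by
  induction ds with
  | nil => simp
  | cons d t ih =>
    simp only [List.flatMap_cons, List.count_append, ih (List.nodup_cons.mp hnd).2,
      List.count_replicate, List.mem_cons]
    rcases List.nodup_cons.mp hnd with ⟨hd, _⟩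
    by_cases h : d = a
    · subst h
      simp [if_neg (fun hm => hd hm)]
    · simp [h, Ne.symm h]

-- counting-sort emission over an ordered digit list is sorted
lemma pairwise_emission (ds : List Char) (hp : ds.Pairwise (· ≤ ·)) (f : Char → Nat) :
    (ds.flatMap (fun d => List.replicate (f d) d)).Pairwise (· ≤ ·) := by
  induction ds with
  | nil => simp
  | cons d t ih =>
    rcases List.pairwise_cons.mp hp with ⟨hd, ht⟩
    simp only [List.flatMap_cons]
    rw [List.pairwise_append]
    refine ⟨List.pairwise_replicate.mpr (Or.inr le_rfl), ih ht, ?_⟩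
    intro a ha b hb
    rcases List.eq_of_mem_replicate ha with rfl
    rcases List.mem_flatMap.mp hb with ⟨d', hd', hb'⟩
    rcases List.eq_of_mem_replicate hb' with rfl
    exact hd _ hd'

-- if every element of l is a digit, sorting l is exactly the counting-sort emission
lemma sorted_eq_emission (l : List Char) (hl : ∀ c ∈ l, c ∈ pvDigits) :
    PySem.List.sorted l (fun x => x) false
      = pvDigits.flatMap (fun d => List.replicate (l.count d) d) := by
  apply PySem.List.sorted_id_eq_of_perm_of_pairwise
  · refine List.perm_iff_count.mpr (fun a => ?_)
    rw [count_emission _ (by decide) _ a]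
    by_cases h : a ∈ pvDigits
    · simp [h]
    · rw [if_neg h, eq_comm, List.count_eq_zero]
      exact fun ha => h (hl a ha)
  · exact pairwise_emission _ (by decide) _

-- ===== VERDICT (by name: the statement is the Claim_ definition above) =====
theorem rearranged_difference_spec : Claim_equal_rearranged_difference := by
  intro num _ hpre
  unfold Spec_rearranged_difference rearranged_difference rearranged_difference_alt
  dsimp only []
  have hl := toChars_mem_pvDigits num hpre
  set l := PySem.Int.toChars num with hldef
  rw [PySem.List.foldl_append_singleton_eq_self, List.nil_append]
  rw [PySem.List.foldl_append_eq_flatMap, PySem.List.foldl_append_eq_flatMap, List.nil_append,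
    List.nil_append]
  have hc : ∀ d : Char,
      ((l.foldl (fun d ch => d.insert ch (d.getD ch 0 + 1))
          (PySem.Dict.empty : PySem.Dict Char Int)).getD d 0).toNat = l.count d := by
    intro d
    rw [PySem.Dict.getD_foldl_insert_add_one]
    simp [PySem.Dict.getD, PySem.Dict.get?, PySem.Dict.empty]
  have hsm : (pvDigits.flatMap
        (fun d => List.replicate ((l.foldl (fun d ch => d.insert ch (d.getD ch 0 + 1))
          (PySem.Dict.empty : PySem.Dict Char Int)).getD d 0).toNat d))
      = pvDigits.flatMap (fun d => List.replicate (l.count d) d) := by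
    apply List.flatMap_congr
    intro d _
    rw [hc d]
  have hlg : (pvDigitsRev.flatMap
        (fun d => List.replicate ((l.foldl (fun d ch => d.insert ch (d.getD ch 0 + 1))
          (PySem.Dict.empty : PySem.Dict Char Int)).getD d 0).toNat d))
      = pvDigitsRev.flatMap (fun d => List.replicate (l.count d) d) := by
    apply List.flatMap_congr
    intro d _
    rw [hc d]
  rw [hsm, hlg, sorted_eq_emission l hl]
  have hrev : (pvDigits.flatMap (fun d => List.replicate (l.count d) d)).reverse
      = pvDigitsRev.flatMap (fun d => List.replicate (l.count d) d) := by
    rw [List.reverse_flatMap]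
    show (pvDigits.reverse.flatMap fun d => (List.replicate (l.count d) d).reverse) = _
    have : pvDigits.reverse = pvDigitsRev := by decide
    rw [this]
    exact List.flatMap_congr (fun d _ => List.reverse_replicate)
  rw [hrev]
  cases PySem.Int.ofChars? (pvDigitsRev.flatMap fun d => List.replicate (l.count d) d) <;>
    cases PySem.Int.ofChars? (pvDigits.flatMap fun d => List.replicate (l.count d) d) <;> rfl
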